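-- pv_equiv track=rewrite | github.com/santiagoaldana/job-search | skills/gmail_monitor.py | match_to_contact
-- ===== SOURCE A (Python) =====
-- from typing import Optional
--
-- def match_to_contact(from_email: str, from_name: str, tracker_records: list) -> Optional[dict]:
--     """
--     3-pass matching against outreach tracker:
--       Pass 1: exact email match on contact_email field
--       Pass 2: domain match (same company domain) + name partial match
--       Pass 3: name token overlap (≥2 tokens matching, case-insensitive)
--     Returns the matching OutreachRecord dict or None.
--     """
--     from_email = from_email.lower().strip()
--     from_domain = from_email.split("@")[-1] if "@" in from_email else ""
--     name_tokens = set(from_name.lower().split()) if from_name else set()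
--
--     # Pass 1: exact email
--     for rec in tracker_records:
--         if rec.get("contact_email", "").lower().strip() == from_email:
--             return rec
--
--     # Pass 2: domain + name partial
--     if from_domain and from_domain not in {"gmail.com", "yahoo.com", "hotmail.com", "outlook.com", "me.com"}:
--         for rec in tracker_records:
--             rec_email = rec.get("contact_email", "").lower()
--             rec_domain = rec_email.split("@")[-1] if "@" in rec_email else ""
--             if rec_domain == from_domain:
--                 rec_name_tokens = set(rec.get("contact_name", "").lower().split())
--                 if name_tokens & rec_name_tokens:  # any overlap
--                     return rec
--
--     # Pass 3: name token overlap (≥2 tokens)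
--     if len(name_tokens) >= 2:
--         for rec in tracker_records:
--             rec_name_tokens = set(rec.get("contact_name", "").lower().split())
--             if len(name_tokens & rec_name_tokens) >= 2:
--                 return rec
--
--     return None
-- ===== SOURCE B (Python) =====
-- _FREE = {"gmail.com", "yahoo.com", "hotmail.com", "outlook.com", "me.com"}
--
-- def match_to_contact(from_email: str, from_name: str, tracker_records: list):
--     """Single-pass: pass-1 returns immediately; first pass-2 and pass-3
--     candidates are remembered during the same sweep and used afterwards."""
--     fe = from_email.lower().strip()
--     fd = fe.split("@")[-1] if "@" in fe else ""
--     name_tokens = set(from_name.lower().split()) if from_name else set()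
--     domain_ok = bool(fd) and fd not in _FREE
--     want3 = len(name_tokens) >= 2
--     cand2 = cand3 = None
--     for rec in tracker_records:
--         rec_email = rec.get("contact_email", "").lower()
--         if rec_email.strip() == fe:
--             return rec
--         rec_tokens = set(rec.get("contact_name", "").lower().split())
--         if cand2 is None and domain_ok:
--             rec_domain = rec_email.split("@")[-1] if "@" in rec_email else ""
--             if rec_domain == fd and name_tokens & rec_tokens:
--                 cand2 = rec
--         if cand3 is None and want3 and len(name_tokens & rec_tokens) >= 2:
--             cand3 = rec
--     return cand2 if cand2 is not None else cand3
-- ===== Notes on version B (the rewrite author's own statement) =====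
-- stated objective: alternative
-- what changed: Replaces A's three sequential scans of tracker_records with one sweep that returns immediately on an exact-email hit and remembers the first pass-2 (domain+name) and pass-3 (>=2 token overlap) candidates, choosing among them after the loop.
import Mathlib
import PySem

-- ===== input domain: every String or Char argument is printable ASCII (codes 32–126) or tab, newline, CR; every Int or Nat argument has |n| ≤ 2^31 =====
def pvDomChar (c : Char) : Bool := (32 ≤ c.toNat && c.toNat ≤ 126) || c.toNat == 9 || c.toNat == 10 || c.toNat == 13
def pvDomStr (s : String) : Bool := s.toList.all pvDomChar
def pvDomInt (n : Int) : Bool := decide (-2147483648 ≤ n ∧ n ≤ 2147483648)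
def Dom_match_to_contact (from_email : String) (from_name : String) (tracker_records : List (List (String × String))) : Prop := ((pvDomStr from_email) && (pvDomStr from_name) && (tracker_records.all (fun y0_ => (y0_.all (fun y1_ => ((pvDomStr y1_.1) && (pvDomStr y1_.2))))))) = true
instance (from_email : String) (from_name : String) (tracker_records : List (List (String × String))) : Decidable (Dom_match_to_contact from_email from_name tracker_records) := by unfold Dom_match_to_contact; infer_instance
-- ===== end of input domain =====

-- B replaces A's three sequential scans of tracker_records by a single sweep that returns on a
-- pass-1 hit and remembers the first pass-2 and pass-3 candidates (objective: alternative, one pass).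

-- ===== PORT A =====
def match_to_contact (from_email : String) (from_name : String) (tracker_records : List (List (String × String))) : Option (List (String × String)) :=
  let fe := PySem.Str.strip (PySem.Str.lower from_email)
  let fd := if PySem.Str.isIn "@" fe then PySem.List.pyGetD ((PySem.Str.split? fe "@").getD []) (-1) "" else ""
  let nameTokens : PySem.Set String :=
    if from_name == "" then PySem.Set.empty
    else PySem.Set.ofList (PySem.Str.split₀ (PySem.Str.lower from_name))
  -- Pass 1: exact email
  match tracker_records.find? (fun rec =>
      PySem.Str.strip (PySem.Str.lower ((PySem.Dict.mk rec).getD "contact_email" "")) == fe) with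
  | some rec => some rec
  | none =>
    -- Pass 2: domain + name partial
    match (if fd != "" && !(["gmail.com", "yahoo.com", "hotmail.com", "outlook.com", "me.com"].contains fd) then
        tracker_records.find? (fun rec =>
          let recEmail := PySem.Str.lower ((PySem.Dict.mk rec).getD "contact_email" "")
          let recDomain := if PySem.Str.isIn "@" recEmail then PySem.List.pyGetD ((PySem.Str.split? recEmail "@").getD []) (-1) "" else ""
          recDomain == fd &&
            !(PySem.Set.inter nameTokens (PySem.Set.ofList (PySem.Str.split₀ (PySem.Str.lower ((PySem.Dict.mk rec).getD "contact_name" ""))))).isEmpty)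
      else none) with
    | some rec => some rec
    | none =>
      -- Pass 3: name token overlap (≥2 tokens)
      if 2 ≤ nameTokens.length then
        tracker_records.find? (fun rec =>
          2 ≤ (PySem.Set.inter nameTokens (PySem.Set.ofList (PySem.Str.split₀ (PySem.Str.lower ((PySem.Dict.mk rec).getD "contact_name" ""))))).length)
      else none

-- ===== PORT B =====
-- the single sweep of Source B: return on a pass-1 hit, remember the first pass-2 / pass-3 candidates
def pvAltLoop (p1 p2 p3 : List (String × String) → Bool) :
    List (List (String × String)) → Option (List (String × String)) → Option (List (String × String)) → Option (List (String × String))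
  | [], c2, c3 => if c2.isSome then c2 else c3
  | rec :: rest, c2, c3 =>
    if p1 rec then some rec
    else pvAltLoop p1 p2 p3 rest
      (if c2.isNone && p2 rec then some rec else c2)
      (if c3.isNone && p3 rec then some rec else c3)

def match_to_contact_alt (from_email : String) (from_name : String) (tracker_records : List (List (String × String))) : Option (List (String × String)) :=
  let fe := PySem.Str.strip (PySem.Str.lower from_email)
  let fd := if PySem.Str.isIn "@" fe then PySem.List.pyGetD ((PySem.Str.split? fe "@").getD []) (-1) "" else ""
  let nameTokens : PySem.Set String :=
    if from_name == "" then PySem.Set.empty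
    else PySem.Set.ofList (PySem.Str.split₀ (PySem.Str.lower from_name))
  let domainOk := fd != "" && !(["gmail.com", "yahoo.com", "hotmail.com", "outlook.com", "me.com"].contains fd)
  let want3 := decide (2 ≤ nameTokens.length)
  pvAltLoop
    (fun rec => PySem.Str.strip (PySem.Str.lower ((PySem.Dict.mk rec).getD "contact_email" "")) == fe)
    (fun rec => domainOk &&
      (let recEmail := PySem.Str.lower ((PySem.Dict.mk rec).getD "contact_email" "")
       let recDomain := if PySem.Str.isIn "@" recEmail then PySem.List.pyGetD ((PySem.Str.split? recEmail "@").getD []) (-1) "" else ""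
       recDomain == fd &&
         !(PySem.Set.inter nameTokens (PySem.Set.ofList (PySem.Str.split₀ (PySem.Str.lower ((PySem.Dict.mk rec).getD "contact_name" ""))))).isEmpty))
    (fun rec => want3 &&
      decide (2 ≤ (PySem.Set.inter nameTokens (PySem.Set.ofList (PySem.Str.split₀ (PySem.Str.lower ((PySem.Dict.mk rec).getD "contact_name" ""))))).length))
    tracker_records none none

-- ===== PRECONDITION & SPEC =====
def Spec_match_to_contact (from_email : String) (from_name : String) (tracker_records : List (List (String × String))) (out : Option (List (String × String))) : Prop := out = match_to_contact_alt from_email from_name tracker_records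
instance (from_email : String) (from_name : String) (tracker_records : List (List (String × String))) (out : Option (List (String × String))) : Decidable (Spec_match_to_contact from_email from_name tracker_records out) := by unfold Spec_match_to_contact; infer_instance

-- ===== CLAIM (what is proved, stated in full; the proofs are below) =====
def Claim_equal_match_to_contact : Prop := ∀ (from_email : String) (from_name : String) (tracker_records : List (List (String × String))), Dom_match_to_contact from_email from_name tracker_records → Spec_match_to_contact from_email from_name tracker_records (match_to_contact from_email from_name tracker_records)

-- ===== LEMMAS AND PROOFS =====

lemma find?_and_const {α : Type} (b : Bool) (q : α → Bool) (xs : List α) :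
    xs.find? (fun x => b && q x) = if b then xs.find? q else none := by
  cases b <;> simp

-- loop invariant for B's sweep: the stored candidates shadow the remaining scans
lemma pvAltLoop_spec (p1 p2 p3 : List (String × String) → Bool)
    (recs : List (List (String × String))) (c2 c3 : Option (List (String × String))) :
    pvAltLoop p1 p2 p3 recs c2 c3 =
      match recs.find? p1 with
      | some r => some r
      | none =>
        match (match c2 with | some r => some r | none => recs.find? p2) with
        | some r => some r
        | none => match c3 with | some r => some r | none => recs.find? p3 := by
  induction recs generalizing c2 c3 with
  | nil => cases c2 <;> cases c3 <;> simp [pvAltLoop]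
  | cons rec rest ih =>
    simp only [pvAltLoop]
    by_cases h1 : p1 rec = true
    · simp [h1]
    · rw [if_neg h1, ih]
      simp only [List.find?_cons]
      rw [Bool.not_eq_true] at h1
      cases c2 <;> cases c3 <;>
        by_cases h2 : p2 rec = true <;> by_cases h3 : p3 rec = true <;>
          simp_all

-- ===== VERDICT (by name: the statement is the Claim_ definition above) =====
theorem match_to_contact_spec : Claim_equal_match_to_contact := by
  intro from_email from_name tracker_records _
  unfold Spec_match_to_contact match_to_contact match_to_contact_alt
  rw [pvAltLoop_spec, find?_and_const, find?_and_const]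
  simp
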